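-- pv_equiv track=rewrite | github.com/ArthurTonial/CP-Algorithms | C2Ladder/1200/HatedX.py | solve
-- ===== SOURCE A (Python) =====
-- def solve(hated_n, arr, size):
--     acc = sum(arr)
--
--     if acc % hated_n != 0:
--         return size
--
--     l = 0
--     suffix = acc
--     while suffix % hated_n == 0 and l < size:
--         suffix -= arr[l]
--         l += 1
--
--     r = size - 1
--     prefix = acc
--     while prefix % hated_n == 0 and r > -1:
--         prefix -= arr[r]
--         r -= 1
--
--     if r == -1 and l == size:
--         return -1
--     return max(size - l, size - (size - r) + 1)
-- ===== SOURCE B (Python) =====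
-- def solve(hated_n, arr, size):
--     total = sum(arr)
--     if total % hated_n != 0:
--         return size
--     first = last = -1
--     for i in range(size):
--         if arr[i] % hated_n != 0:
--             if first == -1:
--                 first = i
--             last = i
--     if first == -1:
--         return -1
--     return max(size - first - 1, last)
-- ===== Notes on version B (the rewrite author's own statement) =====
-- stated objective: simpler
-- what changed: Replaced A's two sum-subtracting pointer while-loops by a single left-to-right scan that records the first and last indices of elements not divisible by hated_n, from which the answer is a closed-form max.
-- outside the precondition, e.g. on solve(2, [3, 1], 1): A returns -1, B returns 0; on solve(2, [2], -3): A returns -3, B returns -1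
import Mathlib
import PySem

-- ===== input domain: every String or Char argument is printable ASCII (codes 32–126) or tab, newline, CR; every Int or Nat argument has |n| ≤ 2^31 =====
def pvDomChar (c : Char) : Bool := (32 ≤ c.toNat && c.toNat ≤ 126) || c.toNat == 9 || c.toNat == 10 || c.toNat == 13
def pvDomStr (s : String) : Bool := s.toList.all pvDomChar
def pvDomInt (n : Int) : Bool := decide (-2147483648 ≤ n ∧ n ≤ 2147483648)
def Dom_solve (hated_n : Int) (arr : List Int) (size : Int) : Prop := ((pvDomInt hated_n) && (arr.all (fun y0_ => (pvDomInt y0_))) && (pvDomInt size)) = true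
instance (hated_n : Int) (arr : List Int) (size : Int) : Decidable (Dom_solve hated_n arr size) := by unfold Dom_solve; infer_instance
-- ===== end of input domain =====

-- B replaces A's two sum-subtracting pointer loops by a single left-to-right scan that records the
-- first and last indices of elements not divisible by hated_n (objective: simpler, same O(n) cost).

-- ===== PORT A =====
-- 'while suffix % hated_n == 0 and l < size: suffix -= arr[l]; l += 1'
def solveLoopL (hated_n : Int) (arr : List Int) (size : Int) : Nat → Int → Int → Int × Int
  | 0, l, suffix => (l, suffix)
  | fuel + 1, l, suffix =>
    if PySem.Int.mod suffix hated_n = 0 ∧ l < size then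
      solveLoopL hated_n arr size fuel (l + 1) (suffix - PySem.List.pyGetD arr l 0)
    else (l, suffix)

-- 'while prefix % hated_n == 0 and r > -1: prefix -= arr[r]; r -= 1'
def solveLoopR (hated_n : Int) (arr : List Int) : Nat → Int → Int → Int × Int
  | 0, r, pfx => (r, pfx)
  | fuel + 1, r, pfx =>
    if PySem.Int.mod pfx hated_n = 0 ∧ r > -1 then
      solveLoopR hated_n arr fuel (r - 1) (pfx - PySem.List.pyGetD arr r 0)
    else (r, pfx)

def solve (hated_n : Int) (arr : List Int) (size : Int) : Int :=
  let acc := arr.sum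
  if PySem.Int.mod acc hated_n ≠ 0 then size
  else
    let l := (solveLoopL hated_n arr size size.toNat 0 acc).1
    let r := (solveLoopR hated_n arr size.toNat (size - 1) acc).1
    if r = -1 ∧ l = size then -1
    else max (size - l) (size - (size - r) + 1)

-- ===== PORT B =====
-- one scan recording the first/last index with arr[i] % hated_n != 0 (-1 = not yet seen)
def solveAltStep (hated_n : Int) (arr : List Int) (fl : Int × Int) (i : Int) : Int × Int :=
  if PySem.Int.mod (PySem.List.pyGetD arr i 0) hated_n ≠ 0 then
    (if fl.1 = -1 then i else fl.1, i)
  else fl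

def solve_alt (hated_n : Int) (arr : List Int) (size : Int) : Int :=
  let total := arr.sum
  if PySem.Int.mod total hated_n ≠ 0 then size
  else
    let fl := (PySem.List.pyRange 0 size 1).foldl (solveAltStep hated_n arr) (-1, -1)
    if fl.1 = -1 then -1 else max (size - fl.1 - 1) fl.2

-- ===== PRECONDITION & SPEC =====
-- Pre_ excludes hated_n = 0 (A raises ZeroDivisionError), size outside 0..len(arr) when sum(arr) is
-- divisible by hated_n (A raises IndexError for size > len(arr) and returns untouched loop state for
-- size < 0), and the corner size = 1 with arr[0] not divisible while the total sum is: there A's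
-- exhausted-loops guard accidentally yields -1 while B yields 0, and neither value is canonical.
def Pre_solve (hated_n : Int) (arr : List Int) (size : Int) : Prop :=
  hated_n ≠ 0 ∧
    (PySem.Int.mod arr.sum hated_n ≠ 0 ∨
      (0 ≤ size ∧ size ≤ (arr.length : Int) ∧
        ¬ (size = 1 ∧ PySem.Int.mod (arr.headD 0) hated_n ≠ 0)))
instance (hated_n : Int) (arr : List Int) (size : Int) : Decidable (Pre_solve hated_n arr size) := by unfold Pre_solve; infer_instance

def pvWitness_solve : Int × List Int × Int := (2, ([1, 2, 3], 3))

def Spec_solve (hated_n : Int) (arr : List Int) (size : Int) (out : Int) : Prop := out = solve_alt hated_n arr size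
instance (hated_n : Int) (arr : List Int) (size : Int) (out : Int) : Decidable (Spec_solve hated_n arr size out) := by unfold Spec_solve; infer_instance

-- ===== CLAIM (what is proved, stated in full; the proofs are below) =====
def Claim_equal_solve : Prop := ∀ (hated_n : Int) (arr : List Int) (size : Int), Dom_solve hated_n arr size → Pre_solve hated_n arr size → Spec_solve hated_n arr size (solve hated_n arr size)

-- ===== LEMMAS AND PROOFS =====

-- first index with x % n != 0 in a list (proof-side characterisation)
def firstHit (n : Int) : List Int → Option Nat
  | [] => none
  | x :: t => if PySem.Int.mod x n ≠ 0 then some 0 else (firstHit n t).map (· + 1)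

-- last index with x % n != 0
def lastHit (n : Int) : List Int → Option Nat
  | [] => none
  | x :: t =>
    match lastHit n t with
    | some j => some (j + 1)
    | none => if PySem.Int.mod x n ≠ 0 then some 0 else none

def optInt : Option Nat → Int
  | none => -1
  | some j => (j : Int)

lemma firstHit_eq_none_iff (n : Int) (xs : List Int) :
    firstHit n xs = none ↔ ∀ x ∈ xs, PySem.Int.mod x n = 0 := by
  induction xs with
  | nil => simp [firstHit]
  | cons x t ih => by_cases h : PySem.Int.mod x n = 0 <;> simp [firstHit, h, ih]

lemma lastHit_eq_none_iff (n : Int) (xs : List Int) :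
    lastHit n xs = none ↔ ∀ x ∈ xs, PySem.Int.mod x n = 0 := by
  induction xs with
  | nil => simp [lastHit]
  | cons x t ih =>
    cases h : lastHit n t with
    | some j =>
      have hnall : ¬ ∀ y ∈ t, PySem.Int.mod y n = 0 := by
        intro hall; rw [ih.mpr hall] at h; simp at h
      simp only [lastHit, h]
      constructor
      · intro hc; simp at hc
      · intro hall
        exact absurd (fun y hy => hall y (List.mem_cons_of_mem _ hy)) hnall
    | none =>
      have hall := ih.mp h
      by_cases hx : PySem.Int.mod x n = 0
      · simp only [lastHit, h, hx, ne_eq, not_true_eq_false, if_false]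
        constructor
        · intro _ y hy
          rcases List.mem_cons.mp hy with rfl | hyt
          · exact hx
          · exact hall y hyt
        · intro _; trivial
      · simp only [lastHit, h, ne_eq, hx, not_false_eq_true, if_true]
        constructor
        · intro hc; simp at hc
        · intro hall2; exact absurd (hall2 x (by simp)) hx

lemma firstHit_append_singleton (n : Int) (ys : List Int) (y : Int) :
    firstHit n (ys ++ [y]) =
      match firstHit n ys with
      | some j => some j
      | none => if PySem.Int.mod y n ≠ 0 then some ys.length else none := by
  induction ys with
  | nil => by_cases h : PySem.Int.mod y n = 0 <;> simp [firstHit, h]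
  | cons x t ih =>
    by_cases h : PySem.Int.mod x n = 0
    · simp only [List.cons_append, firstHit, h, ne_eq, not_true_eq_false, if_false, ih]
      cases ht : firstHit n t <;> by_cases hy : PySem.Int.mod y n = 0 <;> simp [hy, List.length_cons]
    · simp [firstHit, h]

lemma lastHit_append_singleton (n : Int) (ys : List Int) (y : Int) :
    lastHit n (ys ++ [y]) =
      if PySem.Int.mod y n ≠ 0 then some ys.length else lastHit n ys := by
  induction ys with
  | nil => by_cases h : PySem.Int.mod y n = 0 <;> simp [lastHit, h]
  | cons x t ih =>
    by_cases hy : PySem.Int.mod y n = 0 <;>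
      simp only [List.cons_append, lastHit, ih, hy, ne_eq, not_true_eq_false, if_false,
        not_false_eq_true, if_true] <;>
      cases ht : lastHit n t <;> simp [List.length_cons]

lemma firstHit_le_lastHit (n : Int) (xs : List Int) :
    ∀ (f g : Nat), firstHit n xs = some f → lastHit n xs = some g → f ≤ g := by
  induction xs with
  | nil => intro f g hf _; simp [firstHit] at hf
  | cons x t ih =>
    intro f g hf hg
    by_cases hx : PySem.Int.mod x n = 0
    · simp only [firstHit, hx, ne_eq, not_true_eq_false, if_false, Option.map_eq_some_iff] at hf
      obtain ⟨f', hf', rfl⟩ := hf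
      cases ht : lastHit n t with
      | none =>
        have hfn : firstHit n t = none :=
          (firstHit_eq_none_iff n t).mpr ((lastHit_eq_none_iff n t).mp ht)
        rw [hfn] at hf'; simp at hf'
      | some j =>
        simp only [lastHit, ht, Option.some_inj] at hg
        have := ih f' j hf' ht
        omega
    · simp only [firstHit, hx, ne_eq, not_false_eq_true, if_true, Option.some_inj] at hf
      omega

lemma solveLoopL_spec (n : Int) (arr : List Int) (s : Nat) (hdvd : n ∣ arr.sum)
    (hs : s ≤ arr.length) :
    ∀ (fuel k : Nat), k + fuel = s →
      (solveLoopL n arr (s : Int) fuel (k : Int) (arr.sum - (arr.take k).sum)).1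
        = if n ∣ (arr.take k).sum then
            (match firstHit n ((arr.take s).drop k) with
             | some j => ((k + j + 1 : Nat) : Int)
             | none => (s : Int))
          else (k : Int) := by
  intro fuel
  induction fuel with
  | zero =>
    intro k hk
    have hk' : k = s := by omega
    have hnil : (arr.take s).drop s = [] := by
      apply List.drop_of_length_le
      simp [Nat.min_eq_left hs]
    simp [solveLoopL, hnil, firstHit, hk']

  | succ fuel ih =>
    intro k hk
    have hks : k < s := by omega
    have hklt : k < arr.length := by omega
    have hmod : (PySem.Int.mod (arr.sum - (arr.take k).sum) n = 0) ↔ n ∣ (arr.take k).sum := by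
      rw [PySem.Int.mod_eq_zero_iff_dvd]
      constructor
      · intro h
        have h2 : arr.sum - (arr.sum - (arr.take k).sum) = (arr.take k).sum := by ring
        exact h2 ▸ dvd_sub hdvd h
      · intro h; exact dvd_sub hdvd h
    have hkt : k < (arr.take s).length := by simp [Nat.min_eq_left hs]; omega
    have hdropk : (arr.take s).drop k = arr[k] :: (arr.take s).drop (k + 1) := by
      rw [List.drop_eq_getElem_cons hkt, List.getElem_take]
    by_cases hdt : n ∣ (arr.take k).sum
    · have hcond : PySem.Int.mod (arr.sum - (arr.take k).sum) n = 0 ∧ (k : Int) < (s : Int) := by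
        exact ⟨hmod.mpr hdt, by exact_mod_cast hks⟩
      rw [solveLoopL, if_pos hcond]
      have hget : PySem.List.pyGetD arr (k : Int) 0 = arr[k] := by
        simp [PySem.List.pyGetD_natCast, List.getD_eq_getElem?_getD, List.getElem?_eq_getElem hklt]
      have htake : (arr.take (k + 1)).sum = (arr.take k).sum + arr[k] :=
        List.sum_take_succ arr k hklt
      have harg : arr.sum - (arr.take k).sum - PySem.List.pyGetD arr (k : Int) 0
          = arr.sum - (arr.take (k + 1)).sum := by
        rw [hget, htake]; ring
      have hcast : (k : Int) + 1 = ((k + 1 : Nat) : Int) := by push_cast; ring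
      rw [harg, hcast, ih (k + 1) (by omega)]
      by_cases hel : n ∣ arr[k]
      · have hdt1 : n ∣ (arr.take (k + 1)).sum := by rw [htake]; exact dvd_add hdt hel
        rw [if_pos hdt1, if_pos hdt]
        have hfh : firstHit n ((arr.take s).drop k)
            = (firstHit n ((arr.take s).drop (k + 1))).map (· + 1) := by
          rw [hdropk]
          simp [firstHit, (PySem.Int.mod_eq_zero_iff_dvd arr[k] n).mpr hel]
        rw [hfh]
        cases firstHit n ((arr.take s).drop (k + 1)) with
        | none => simp
        | some j => simp; ring
      · have hdt1 : ¬ n ∣ (arr.take (k + 1)).sum := by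
          rw [htake]; intro h
          have h2 : (arr.take k).sum + arr[k] - (arr.take k).sum = arr[k] := by ring
          exact hel (h2 ▸ dvd_sub h hdt)
        rw [if_neg hdt1, if_pos hdt]
        have hmk : PySem.Int.mod arr[k] n ≠ 0 :=
          fun h => hel ((PySem.Int.mod_eq_zero_iff_dvd arr[k] n).mp h)
        have hfh : firstHit n ((arr.take s).drop k) = some 0 := by
          rw [hdropk]; simp [firstHit, hmk]
        rw [hfh]
    · rw [solveLoopL, if_neg (by rw [hmod]; tauto), if_neg hdt]

lemma solveLoopR_spec (n : Int) (arr : List Int) (s : Nat) (hdvd : n ∣ arr.sum)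
    (hs : s ≤ arr.length) :
    ∀ (k fuel : Nat), k ≤ s → k ≤ fuel →
      (solveLoopR n arr fuel ((k : Int) - 1) (arr.sum - ((arr.take s).drop k).sum)).1
        = if n ∣ ((arr.take s).drop k).sum then
            (match lastHit n (arr.take k) with
             | some j => (j : Int) - 1
             | none => -1)
          else (k : Int) - 1 := by
  intro k
  induction k with
  | zero =>
    intro fuel _ _
    have hstop : ∀ pfx, (solveLoopR n arr fuel (((0 : Nat) : Int) - 1) pfx).1
        = ((0 : Nat) : Int) - 1 := by
      intro pfx; cases fuel <;> simp [solveLoopR]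
    rw [hstop]
    split <;> simp [lastHit]
  | succ k ih =>
    intro fuel hlen hfuel
    obtain ⟨fuel', rfl⟩ : ∃ f', fuel = f' + 1 := ⟨fuel - 1, by omega⟩
    have hks : k < s := by omega
    have hklt : k < arr.length := by omega
    have hmod : (PySem.Int.mod (arr.sum - ((arr.take s).drop (k + 1)).sum) n = 0)
        ↔ n ∣ ((arr.take s).drop (k + 1)).sum := by
      rw [PySem.Int.mod_eq_zero_iff_dvd]
      constructor
      · intro h
        have h2 : arr.sum - (arr.sum - ((arr.take s).drop (k + 1)).sum)
            = ((arr.take s).drop (k + 1)).sum := by ring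
        exact h2 ▸ dvd_sub hdvd h
      · intro h; exact dvd_sub hdvd h
    have hr : ((k + 1 : Nat) : Int) - 1 = (k : Int) := by push_cast; ring
    have hkt : k < (arr.take s).length := by simp [Nat.min_eq_left hs]; omega
    have hdropk : (arr.take s).drop k = arr[k] :: (arr.take s).drop (k + 1) := by
      rw [List.drop_eq_getElem_cons hkt, List.getElem_take]
    have hdsum : ((arr.take s).drop k).sum = arr[k] + ((arr.take s).drop (k + 1)).sum := by
      rw [hdropk, List.sum_cons]
    have htakes : arr.take (k + 1) = arr.take k ++ [arr[k]] :=
      List.take_succ_eq_append_getElem hklt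
    by_cases hd : n ∣ ((arr.take s).drop (k + 1)).sum
    · have hcond : PySem.Int.mod (arr.sum - ((arr.take s).drop (k + 1)).sum) n = 0
          ∧ ((k + 1 : Nat) : Int) - 1 > -1 := by
        refine ⟨hmod.mpr hd, ?_⟩
        rw [hr]; omega
      rw [solveLoopR, if_pos hcond]
      have hget : PySem.List.pyGetD arr (((k + 1 : Nat) : Int) - 1) 0 = arr[k] := by
        rw [hr]
        simp [PySem.List.pyGetD_natCast, List.getD_eq_getElem?_getD, List.getElem?_eq_getElem hklt]
      have harg : arr.sum - ((arr.take s).drop (k + 1)).sum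
            - PySem.List.pyGetD arr (((k + 1 : Nat) : Int) - 1) 0
          = arr.sum - ((arr.take s).drop k).sum := by
        rw [hget, hdsum]; ring
      have hr2 : ((k + 1 : Nat) : Int) - 1 - 1 = (k : Int) - 1 := by push_cast; ring
      rw [harg, hr2, ih fuel' (by omega) (by omega)]
      by_cases hel : n ∣ arr[k]
      · have hdk : n ∣ ((arr.take s).drop k).sum := by rw [hdsum]; exact dvd_add hel hd
        rw [if_pos hdk, if_pos hd]
        rw [htakes, lastHit_append_singleton,
          if_neg (by simp [(PySem.Int.mod_eq_zero_iff_dvd arr[k] n).mpr hel])]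
      · have hdk : ¬ n ∣ ((arr.take s).drop k).sum := by
          rw [hdsum]; intro h
          have h2 : arr[k] + ((arr.take s).drop (k + 1)).sum - ((arr.take s).drop (k + 1)).sum
              = arr[k] := by ring
          exact hel (h2 ▸ dvd_sub h hd)
        rw [if_neg hdk, if_pos hd]
        rw [htakes, lastHit_append_singleton,
          if_pos (by intro h; exact hel ((PySem.Int.mod_eq_zero_iff_dvd arr[k] n).mp h))]
        simp [List.length_take, Nat.min_eq_left (le_of_lt hklt)]
    · rw [solveLoopR, if_neg (by rw [hmod]; tauto), if_neg hd]

lemma foldFL_spec (n : Int) (arr : List Int) :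
    ∀ (m : Nat), m ≤ arr.length →
      (PySem.List.pyRange 0 (m : Int) 1).foldl (solveAltStep n arr) (-1, -1)
        = (optInt (firstHit n (arr.take m)), optInt (lastHit n (arr.take m))) := by
  intro m
  induction m with
  | zero => simp [PySem.List.pyRange_one_eq_nil, firstHit, lastHit, optInt]
  | succ m ih =>
    intro hlen
    have hmlt : m < arr.length := by omega
    have hcast : ((m + 1 : Nat) : Int) = (m : Int) + 1 := by push_cast; ring
    rw [hcast, PySem.List.pyRange_one_succ_right (by positivity), List.foldl_append,
      ih (by omega)]
    have hget : PySem.List.pyGetD arr (m : Int) 0 = arr[m] := by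
      simp [PySem.List.pyGetD_natCast, List.getD_eq_getElem?_getD, List.getElem?_eq_getElem hmlt]
    have htakes : arr.take (m + 1) = arr.take m ++ [arr[m]] :=
      List.take_succ_eq_append_getElem hmlt
    rw [htakes, firstHit_append_singleton, lastHit_append_singleton]
    simp only [List.foldl_cons, List.foldl_nil, solveAltStep, hget]
    have hlentake : (arr.take m).length = m := by simp [Nat.min_eq_left (le_of_lt hmlt)]
    by_cases hp : PySem.Int.mod arr[m] n = 0
    · cases firstHit n (arr.take m) <;> simp [hp]
    · simp only [ne_eq, hp, not_false_eq_true, if_true]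
      cases hf : firstHit n (arr.take m) with
      | none => simp [optInt, hlentake]
      | some j => simp [optInt, hlentake, show ((j : Nat) : Int) ≠ -1 by omega]

-- ===== VERDICT (by name: the statement is the Claim_ definition above) =====
theorem solve_spec : Claim_equal_solve := by
  intro n arr size _ hpre
  unfold Spec_solve solve solve_alt
  by_cases hm : PySem.Int.mod arr.sum n ≠ 0
  · simp only [if_pos hm]
  · simp only [ne_eq, not_not] at hm
    have hdvd : n ∣ arr.sum := (PySem.Int.mod_eq_zero_iff_dvd arr.sum n).mp hm
    obtain ⟨h0, h1, hcorner⟩ : 0 ≤ size ∧ size ≤ (arr.length : Int)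
        ∧ ¬ (size = 1 ∧ PySem.Int.mod (arr.headD 0) n ≠ 0) := by
      rcases hpre.2 with h | h
      · exact absurd hm h
      · exact h
    simp only [hm, ne_eq, not_true_eq_false, if_false]
    obtain ⟨s, rfl⟩ : ∃ s : Nat, size = (s : Int) := ⟨size.toNat, by omega⟩
    have hs : s ≤ arr.length := by omega
    have hL := solveLoopL_spec n arr s hdvd hs s 0 (by omega)
    simp only [Nat.cast_zero, List.take_zero, List.sum_nil, sub_zero, List.drop_zero,
      dvd_zero, if_true] at hL
    have hR := solveLoopR_spec n arr s hdvd hs s s (le_refl _) (le_refl _)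
    have hnil : (arr.take s).drop s = [] := by
      apply List.drop_of_length_le; simp [Nat.min_eq_left hs]
    simp only [hnil, List.sum_nil, sub_zero, dvd_zero, if_true] at hR
    have hF := foldFL_spec n arr s hs
    have htn : ((s : Int)).toNat = s := by omega
    rw [htn, hL, hR, hF]
    cases hfh : firstHit n (arr.take s) with
    | none =>
      have hlh : lastHit n (arr.take s) = none :=
        (lastHit_eq_none_iff n _).mpr ((firstHit_eq_none_iff n _).mp hfh)
      rw [hlh]
      simp [optInt]
    | some f =>
      have hlh : lastHit n (arr.take s) ≠ none := by
        intro h2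
        have hfn : firstHit n (arr.take s) = none :=
          (firstHit_eq_none_iff n _).mpr ((lastHit_eq_none_iff n _).mp h2)
        rw [hfn] at hfh
        simp at hfh
      obtain ⟨g, hg⟩ := Option.ne_none_iff_exists'.mp hlh
      rw [hg]
      have hfg : f ≤ g := firstHit_le_lastHit n (arr.take s) f g hfh hg
      have hguard : ¬ ((g : Int) - 1 = -1 ∧ ((0 + f + 1 : Nat) : Int) = (s : Int)) := by
        rintro ⟨hg1, hf1⟩
        have hgz : g = 0 := by omega
        have hfz : f = 0 := by omega
        have hs1 : s = 1 := by omega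
        subst hgz; subst hs1
        obtain ⟨a, t, rfl⟩ : ∃ a t, arr = a :: t := by
          cases arr with
          | nil => exact absurd hs (by decide)
          | cons a t => exact ⟨a, t, rfl⟩
        have htake1 : (a :: t).take 1 = [a] := rfl
        rw [htake1] at hfh
        have hma : PySem.Int.mod a n ≠ 0 := by
          intro hma0
          simp [firstHit, hma0] at hfh
        exact hcorner ⟨by omega, by simpa using hma⟩
      rw [if_neg hguard]
      simp only [optInt]
      rw [if_neg (show ((f : Nat) : Int) ≠ -1 by omega)]
      have e1 : (s : Int) - ((0 + f + 1 : Nat) : Int) = (s : Int) - (f : Int) - 1 := by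
        push_cast; ring
      have e2 : (s : Int) - ((s : Int) - ((g : Int) - 1)) + 1 = (g : Int) := by ring
      rw [e1, e2]
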